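-- pv_equiv track=rewrite | github.com/reenadangi/python | python_stack/Algos/leetcode_may/JewelsandStones.py | heights
-- ===== SOURCE A (Python) =====
-- def heights(arr):
--     res=[]
--     for i in arr:
--         if i>0 and i not in res:
--             if len(res)>0:
--                 if i>res[-1]:
--                     res.append(i)
--             else:
--                 res.append(i)
--     return res
-- ===== SOURCE B (Python) =====
-- def heights(arr):
--     # Record-based reformulation: an element is kept by A exactly when it is a
--     # strict record of the whole prefix (greater than every earlier element)
--     # and positive.  Stage 1 builds the prefix-maximum table; stage 2 selects.
--     pmax = []          # pmax[k] = max(arr[:k]), None for the empty prefix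
--     m = None
--     for x in arr:
--         pmax.append(m)
--         m = x if m is None or x > m else m
--     return [x for x, p in zip(arr, pmax) if x > 0 and (p is None or x > p)]
-- ===== Notes on version B (the rewrite author's own statement) =====
-- stated objective: faster
-- what changed: Replaced A's stateful filtering against the result list (membership scan + last-element comparison) by a record-based two-stage algorithm: build a prefix-maximum table of the input, then keep exactly the positive strict records; correctness rests on the lemma that A's last kept value always equals the running prefix maximum.
import Mathlib
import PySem

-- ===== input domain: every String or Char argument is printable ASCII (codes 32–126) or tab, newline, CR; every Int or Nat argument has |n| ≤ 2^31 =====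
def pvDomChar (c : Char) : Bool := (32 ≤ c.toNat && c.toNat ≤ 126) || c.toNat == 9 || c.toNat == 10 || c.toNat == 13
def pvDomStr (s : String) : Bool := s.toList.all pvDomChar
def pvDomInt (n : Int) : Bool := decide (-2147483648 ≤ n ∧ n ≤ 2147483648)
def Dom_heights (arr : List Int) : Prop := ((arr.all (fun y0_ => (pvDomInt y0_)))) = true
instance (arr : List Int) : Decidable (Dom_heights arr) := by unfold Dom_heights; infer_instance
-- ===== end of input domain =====

-- B replaces A's stateful filtering against the result list by a record-based two-stage
-- algorithm (prefix-maximum table, then select the positive strict records): O(n) vs O(n^2).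

-- ===== PORT A =====
-- one loop iteration of A: the same branch structure, in the same order
def heightsStep (res : List Int) (i : Int) : List Int :=
  if i > 0 ∧ ¬ res.contains i then
    if res.length > 0 then
      -- res[-1]; the none case is unreachable because len(res) > 0
      match PySem.List.pyGet? res (-1) with
      | some last => if i > last then res ++ [i] else res
      | none => res
    else res ++ [i]
  else res

def heights (arr : List Int) : List Int := arr.foldl heightsStep []

-- ===== PORT B =====
-- stage 1: one fold appending the running maximum before it is updated
-- ('m = x if m is None or x > m else m')
def pmaxStep (st : List (Option Int) × Option Int) (x : Int) : List (Option Int) × Option Int :=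
  (st.1 ++ [st.2],
   match st.2 with
   | none => some x
   | some l => if x > l then some x else some l)

-- stage 2: the comprehension '[x for x, p in zip(arr, pmax) if x > 0 and (p is None or x > p)]'
def heights_alt (arr : List Int) : List Int :=
  ((arr.zip (arr.foldl pmaxStep ([], none)).1).filter
      (fun xp => decide (xp.1 > 0) &&
        match xp.2 with
        | none => true
        | some l => decide (xp.1 > l))).map Prod.fst

-- ===== PRECONDITION & SPEC =====
def Spec_heights (arr : List Int) (out : List Int) : Prop := out = heights_alt arr
instance (arr : List Int) (out : List Int) : Decidable (Spec_heights arr out) := by unfold Spec_heights; infer_instance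

-- ===== CLAIM (what is proved, stated in full; the proofs are below) =====
def Claim_equal_heights : Prop := ∀ (arr : List Int), Dom_heights arr → Spec_heights arr (heights arr)

-- ===== LEMMAS AND PROOFS =====

-- running-maximum update, shared reference point for both proofs
def omax (m : Option Int) (x : Int) : Option Int :=
  match m with
  | none => some x
  | some l => if x > l then some x else some l

-- reference recursion: keep the positive strict records, carrying the prefix maximum
-- the selection condition, as the Boolean the filter uses
def keepB (m : Option Int) (i : Int) : Bool :=
  decide (i > 0) && match m with | none => true | some l => decide (i > l)

def recSpec (m : Option Int) : List Int → List Int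
  | [] => []
  | i :: rest =>
    if keepB m i then i :: recSpec (omax m i) rest
    else recSpec (omax m i) rest

-- the prefix-maximum table, written recursively
def pmaxList (m : Option Int) : List Int → List (Option Int)
  | [] => []
  | i :: rest => m :: pmaxList (omax m i) rest

theorem pmax_fold (arr : List Int) (acc : List (Option Int)) (m : Option Int) :
    (arr.foldl pmaxStep (acc, m)).1 = acc ++ pmaxList m arr := by
  induction arr generalizing acc m with
  | nil => simp [pmaxList]
  | cons i rest ih =>
    simp only [List.foldl_cons, pmaxStep, pmaxList]
    rw [ih]
    simp [omax]

theorem alt_eq_recSpec_aux (arr : List Int) (m : Option Int) :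
    ((arr.zip (pmaxList m arr)).filter
        (fun xp => decide (xp.1 > 0) &&
          match xp.2 with
          | none => true
          | some l => decide (xp.1 > l))).map Prod.fst = recSpec m arr := by
  induction arr generalizing m with
  | nil => simp [pmaxList, recSpec]
  | cons i rest ih =>
    simp only [pmaxList, List.zip_cons_cons, List.filter_cons, recSpec]
    cases m with
    | none =>
      by_cases hi : i > 0 <;> simp [keepB, hi, ih]
    | some l =>
      by_cases hi : i > 0 <;> by_cases hl : i > l <;> simp [keepB, hi, hl, ih]

theorem alt_eq_recSpec (arr : List Int) : heights_alt arr = recSpec none arr := by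
  unfold heights_alt
  rw [pmax_fold arr [] none, List.nil_append, alt_eq_recSpec_aux]

-- in a strictly increasing list, every member is ≤ the last element
theorem mem_le_getLast (res : List Int) (l : Int) (hp : res.Pairwise (· < ·))
    (hl : res.getLast? = some l) : ∀ x ∈ res, x ≤ l := by
  induction res with
  | nil => simp at hl
  | cons a t ih =>
    intro x hx
    rcases List.mem_cons.mp hx with rfl | hxt
    · cases t with
      | nil => simp at hl; omega
      | cons b u =>
        have hbl : b ∈ (b :: u) := List.mem_cons_self
        have hab : x < b := (List.pairwise_cons.mp hp).1 b hbl
        have := ih (List.pairwise_cons.mp hp).2 (by simpa using hl) b hbl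
        omega
    · cases t with
      | nil => simp at hxt
      | cons b u =>
        exact ih (List.pairwise_cons.mp hp).2 (by simpa using hl) x hxt

-- the relation between A's loop state (res) and the reference's prefix maximum m:
-- res is strictly increasing, and either no positive has been seen (res empty, m ≤ 0 or none)
-- or the last kept value equals m and is positive
def StRel (res : List Int) (m : Option Int) : Prop :=
  res.Pairwise (· < ·) ∧
    ((res = [] ∧ (m = none ∨ ∃ l, m = some l ∧ l ≤ 0)) ∨
     (∃ l, m = some l ∧ res.getLast? = some l ∧ l > 0))

theorem heights_invariant (arr res : List Int) (m : Option Int) (hr : StRel res m) :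
    arr.foldl heightsStep res = res ++ recSpec m arr := by
  induction arr generalizing res m with
  | nil => simp [recSpec]
  | cons i rest ih =>
    obtain ⟨hp, hcase⟩ := hr
    rcases hcase with ⟨hres, hm⟩ | ⟨l, hm, hlast, hlpos⟩
    · -- res = [], no positive seen yet
      subst hres
      have step_eq : heightsStep [] i = if i > 0 then [i] else [] := by
        unfold heightsStep; split_ifs with h1 h2 <;> simp_all
      have keep_iff : keepB m i = true ↔ i > 0 := by
        rcases hm with rfl | ⟨l, rfl, hl⟩
        · simp [keepB]
        · simp [keepB]; omega
      by_cases hi : i > 0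
      · rw [List.foldl_cons, step_eq, if_pos hi]
        have hrel : StRel [i] (omax m i) := by
          refine ⟨by simp, Or.inr ⟨i, ?_, by simp, hi⟩⟩
          rcases hm with rfl | ⟨l, rfl, hl⟩
          · simp [omax]
          · simp [omax]; omega
        rw [ih [i] (omax m i) hrel]
        rw [recSpec, if_pos (keep_iff.mpr hi)]
        simp
      · rw [List.foldl_cons, step_eq, if_neg hi]
        have hrel : StRel [] (omax m i) := by
          refine ⟨by simp, Or.inl ⟨rfl, ?_⟩⟩
          rcases hm with rfl | ⟨l, rfl, hl⟩
          · exact Or.inr ⟨i, by simp [omax], by omega⟩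
          · refine Or.inr ?_
            simp only [omax]
            by_cases h : i > l
            · exact ⟨i, by simp [h], by omega⟩
            · exact ⟨l, by simp [h], hl⟩
        rw [ih [] (omax m i) hrel]
        rw [recSpec, if_neg (by rw [keep_iff]; exact hi)]
    · -- a positive has been kept; res.getLast? = some l = m, l > 0
      subst hm
      have hne : res ≠ [] := by intro h; subst h; simp at hlast
      have hlen : res.length > 0 := List.length_pos_iff.mpr hne
      have step_eq : heightsStep res i = if i > l then res ++ [i] else res := by
        unfold heightsStep
        rw [PySem.List.pyGet?_neg_one, hlast]
        by_cases hil : i > l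
        · have hnotin : i ∉ res := by
            intro hmem
            have := mem_le_getLast res l hp hlast i hmem
            omega
          have hi : i > 0 := by omega
          simp [hi, hil, hnotin, hlen]
        · by_cases hi : i > 0
          · by_cases hin : i ∈ res
            · simp [hi, hil, hin]
            · simp [hi, hil, hin, hlen]
          · simp [hi]; omega
      have keep_iff : keepB (some l) i = true ↔ i > l := by
        simp [keepB]; omega
      by_cases hil : i > l
      · rw [List.foldl_cons, step_eq, if_pos hil]
        have hp' : (res ++ [i]).Pairwise (· < ·) := by
          rw [List.pairwise_append]
          refine ⟨hp, by simp, ?_⟩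
          intro x hx y hy
          simp at hy; subst hy
          have := mem_le_getLast res l hp hlast x hx
          omega
        have hrel : StRel (res ++ [i]) (omax (some l) i) := by
          refine ⟨hp', Or.inr ⟨i, by simp [omax, hil], by simp, by omega⟩⟩
        rw [ih (res ++ [i]) _ hrel]
        rw [recSpec, if_pos (keep_iff.mpr hil)]
        simp
      · rw [List.foldl_cons, step_eq, if_neg hil]
        have hrel : StRel res (omax (some l) i) := by
          refine ⟨hp, Or.inr ⟨l, by simp [omax, hil], hlast, hlpos⟩⟩
        rw [ih res _ hrel]
        rw [recSpec, if_neg (by rw [keep_iff]; exact hil)]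

-- ===== VERDICT (by name: the statement is the Claim_ definition above) =====
theorem heights_spec : Claim_equal_heights := by
  intro arr _
  unfold Spec_heights heights
  rw [alt_eq_recSpec]
  have := heights_invariant arr [] none ⟨by simp, Or.inl ⟨rfl, Or.inl rfl⟩⟩
  simpa using this
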